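-- pv_equiv track=rewrite | github.com/Effyee/codingtestPython | 프로그래머스/2/389479. 서버 증설 횟수/서버 증설 횟수.py | solution
-- ===== SOURCE A (Python) =====
-- def solution(players, m, k):
--     answer = 0
--     # 현재 서버 대수: n
--     n=0
--     s=[]
--     for player in players:
--         if n>0:
--             for i in range(len(s)-1,-1,-1):
--                 s[i]-=1
--                 if s[i]==0:
--                     s.pop(i)
--                     n-=1
--
--         if player>=(n+1)*m:
--             needed_server=player//m
--             added_server=needed_server-n
--             n+=added_server
--             answer+=added_server
--             s+=[k]*added_server
--
--
--     return answer
-- ===== SOURCE B (Python) =====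
-- def solution(players, m, k):
--     # O(T): schedule each batch's expiry hour in a dict instead of
--     # decrementing every live server's lifetime each hour.
--     answer = 0
--     active = 0
--     expire = {}  # hour -> number of servers that stop at the start of that hour
--     t = 0
--     for player in players:
--         active -= expire.get(t, 0)
--         if player >= (active + 1) * m:
--             added = player // m - active
--             answer += added
--             active += added
--             expire[t + k] = expire.get(t + k, 0) + added
--         t += 1
--     return answer
-- ===== Notes on version B (the rewrite author's own statement) =====
-- stated objective: faster
-- what changed: Instead of keeping a list of per-server remaining lifetimes and decrementing/popping every entry every hour (O(T*S)), B keeps a running active-server count and a dict scheduling how many servers stop at each future hour, so each hour costs O(1); Pre_ restricts to m >= 1, the problem's natural positive capacity, because A raises ZeroDivisionError for m = 0 whenever some player count is nonnegative and for m < 0 A's values (negative additions that desynchronise its counter n from its lifetime list s) are implementation accidents outside the problem domain.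
-- outside the precondition, e.g. on solution([27, 12, -3, -4, 18, 24, 15, 19], -1, 5): A returns -27, B returns -51; on solution([-3, -1], 0, 2): A returns 0, B returns 0; on solution([1], 0, 2): A raises ZeroDivisionError, B raises ZeroDivisionError
import Mathlib
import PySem

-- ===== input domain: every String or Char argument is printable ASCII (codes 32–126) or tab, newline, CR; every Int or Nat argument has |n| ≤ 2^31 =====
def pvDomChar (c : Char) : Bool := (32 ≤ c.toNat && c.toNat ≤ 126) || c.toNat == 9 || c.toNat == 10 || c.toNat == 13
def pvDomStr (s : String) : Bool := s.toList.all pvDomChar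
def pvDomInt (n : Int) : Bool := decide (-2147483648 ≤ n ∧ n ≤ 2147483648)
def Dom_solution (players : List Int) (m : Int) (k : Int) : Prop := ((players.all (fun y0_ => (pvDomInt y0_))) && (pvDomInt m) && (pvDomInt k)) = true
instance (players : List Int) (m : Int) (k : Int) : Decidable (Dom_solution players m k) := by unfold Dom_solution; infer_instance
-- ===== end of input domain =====

-- B replaces A's per-hour decrement-and-pop scan of every live server's lifetime with a
-- running active count plus a dict of scheduled stop hours (objective: faster, O(T) vs O(T·S)).

-- ===== PORT A =====
-- inner loop 'for i in range(len(s)-1,-1,-1): s[i]-=1; if s[i]==0: s.pop(i); n-=1'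
-- (i counts down, so popping index i leaves the not-yet-visited lower indices in place)
def tickLoop : Nat → List Int → Int → List Int × Int
  | 0, s, n => (s, n)
  | i + 1, s, n =>
      let v := s.getD i 0 - 1          -- s[i] -= 1 (i is always in range when called with len(s))
      let s' := s.set i v
      if v = 0 then tickLoop i (s'.eraseIdx i) (n - 1)   -- s.pop(i); n -= 1
      else tickLoop i s' n

def aLoop (m k : Int) : List Int → Int → Int → List Int → Int
  | [], answer, _, _ => answer
  | player :: rest, answer, n, s =>
      let sn := if n > 0 then tickLoop s.length s n else (s, n)
      let s1 := sn.1
      let n1 := sn.2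
      if player ≥ (n1 + 1) * m then
        let needed := PySem.Int.floordiv player m
        let added := needed - n1
        -- s += [k]*added  (empty when added ≤ 0, exactly Python's list repetition)
        aLoop m k rest (answer + added) (n1 + added) (s1 ++ List.replicate added.toNat k)
      else aLoop m k rest answer n1 s1

def solution (players : List Int) (m : Int) (k : Int) : Int :=
  aLoop m k players 0 0 []

-- ===== PORT B =====
def bLoop (m k : Int) : List Int → Int → Int → Int → PySem.Dict Int Int → Int
  | [], answer, _, _, _ => answer
  | player :: rest, answer, active, t, d =>
      let active1 := active - d.getD t 0                  -- active -= expire.get(t, 0)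
      if player ≥ (active1 + 1) * m then
        let added := PySem.Int.floordiv player m - active1
        bLoop m k rest (answer + added) (active1 + added) (t + 1)
          (d.insert (t + k) (d.getD (t + k) 0 + added))   -- expire[t+k] = expire.get(t+k, 0) + added
      else bLoop m k rest answer active1 (t + 1) d

def solution_alt (players : List Int) (m : Int) (k : Int) : Int :=
  bLoop m k players 0 0 0 PySem.Dict.empty

-- ===== PRECONDITION & SPEC =====
-- Pre_ restricts to m ≥ 1, the problem's natural positive capacity: with m = 0 A raises
-- ZeroDivisionError as soon as some player count is nonnegative, and with m ≤ 0 A's values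
-- (negative 'additions' that desynchronise its counter n from its lifetime list s) are
-- implementation accidents outside the problem's domain.
def Pre_solution (players : List Int) (m : Int) (k : Int) : Prop := 1 ≤ m
instance (players : List Int) (m : Int) (k : Int) : Decidable (Pre_solution players m k) := by unfold Pre_solution; infer_instance
def pvWitness_solution : List Int × Int × Int := ([5, 3, 0, 12], 2, 2)

def Spec_solution (players : List Int) (m : Int) (k : Int) (out : Int) : Prop := out = solution_alt players m k
instance (players : List Int) (m : Int) (k : Int) (out : Int) : Decidable (Spec_solution players m k out) := by unfold Spec_solution; infer_instance

-- ===== CLAIM (what is proved, stated in full; the proofs are below) =====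
def Claim_equal_solution : Prop := ∀ (players : List Int) (m : Int) (k : Int), Dom_solution players m k → Pre_solution players m k → Spec_solution players m k (solution players m k)

-- ===== LEMMAS AND PROOFS =====

-- one hour's ageing of the lifetime list: every entry decremented, the ones reaching 0 removed
def decF (l : List Int) : List Int := (l.map (· - 1)).filter (· ≠ 0)

lemma tick_spec (a z : List Int) (n : Int) :
    tickLoop a.length (a ++ z) n = (decF a ++ z, n - (a.count 1 : Int)) := by
  induction a using List.reverseRecOn generalizing z n with
  | nil => simp [tickLoop, decF]
  | append_singleton a x ih =>
    have hget : (a ++ [x] ++ z).getD a.length 0 = x := by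
      simp [List.getD_eq_getElem?_getD]
    have hset : (a ++ [x] ++ z).set a.length (x - 1) = a ++ (x - 1) :: z := by
      rw [List.append_assoc]
      rw [List.set_append_right _ _ (le_refl a.length)]
      simp
    have hlen : (a ++ [x]).length = a.length + 1 := by simp
    rw [hlen]
    show (if (a ++ [x] ++ z).getD a.length 0 - 1 = 0 then
            tickLoop a.length (((a ++ [x] ++ z).set a.length ((a ++ [x] ++ z).getD a.length 0 - 1)).eraseIdx a.length) (n - 1)
          else tickLoop a.length ((a ++ [x] ++ z).set a.length ((a ++ [x] ++ z).getD a.length 0 - 1)) n) = _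
    rw [hget, hset]
    by_cases hx : x - 1 = 0
    · have herase : (a ++ (x - 1) :: z).eraseIdx a.length = a ++ z := by
        rw [List.eraseIdx_eq_take_drop_succ]
        simp [List.drop_append]
      rw [if_pos hx, herase, ih]
      have e1 : decF (a ++ [x]) = decF a := by
        simp [decF, List.filter_append, hx]
      have hx1 : x = 1 := by omega
      have e2 : List.count 1 (a ++ [x]) = List.count 1 a + 1 := by
        simp [hx1, List.count_append]
      rw [e1, e2]
      simp only [Prod.mk.injEq]
      refine ⟨by simp, ?_⟩
      push_cast
      omega
    · rw [if_neg hx]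
      rw [ih ((x - 1) :: z) n]
      have e1 : decF (a ++ [x]) = decF a ++ [x - 1] := by
        simp [decF, List.filter_append, hx]
      have hne : ¬ x = 1 := by omega
      have e2 : List.count 1 (a ++ [x]) = List.count 1 a := by
        simp [List.count_append, List.count_cons, hne]
      rw [e1, e2]
      simp only [Prod.mk.injEq]
      exact ⟨by simp, by simp⟩

lemma count_decF_ne (l : List Int) (c : Int) (hc : c ≠ 0) :
    (decF l).count c = l.count (c + 1) := by
  induction l with
  | nil => simp [decF]
  | cons x xs ih =>
    by_cases hx : x - 1 = 0
    · have hd : decF (x :: xs) = decF xs := by simp [decF, hx]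
      have hne : ((x : Int) == c + 1) = false := by
        simp only [beq_eq_false_iff_ne, ne_eq]
        omega
      rw [hd, ih]
      simp [List.count_cons, hne]
    · have hd : decF (x :: xs) = (x - 1) :: decF xs := by simp [decF, hx]
      have hbeq : ((x - 1 : Int) == c) = ((x : Int) == c + 1) := by
        by_cases h : x - 1 = c
        · have h2 : x = c + 1 := by omega
          simp [h, h2]
        · have h2 : x ≠ c + 1 := by omega
          simp [h, h2]
      rw [hd]
      simp only [List.count_cons, ih, hbeq]

lemma length_decF (l : List Int) : ((decF l).length : Int) = (l.length : Int) - (l.count 1 : Int) := by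
  induction l with
  | nil => simp [decF]
  | cons x xs ih =>
    by_cases hx : x - 1 = 0
    · have hd : decF (x :: xs) = decF xs := by simp [decF, hx]
      have hx1 : x = 1 := by omega
      have e2 : List.count 1 (x :: xs) = List.count 1 xs + 1 := by
        simp [hx1, List.count_cons]
      rw [hd, e2, ih]
      simp only [List.length_cons]
      push_cast
      omega
    · have hd : decF (x :: xs) = (x - 1) :: decF xs := by simp [decF, hx]
      have hne : ¬ x = 1 := by omega
      have e2 : List.count 1 (x :: xs) = List.count 1 xs := by
        simp [List.count_cons, hne]
      rw [hd, e2]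
      simp only [List.length_cons]
      push_cast at ih ⊢
      omega

-- the coupling invariant: A's state (n, s) and B's state (active = n, t, d) describe the same
-- servers — a live lifetime v in s is a scheduled stop at hour t + v - 1 in d
lemma main_loop (rest : List Int) (m k : Int) :
    ∀ (ans n : Int) (s : List Int) (t : Int) (d : PySem.Dict Int Int),
      1 ≤ m → n = (s.length : Int) →
      (∀ h : Int, t ≤ h → d.getD h 0 = (s.count (h - t + 1) : Int)) →
      aLoop m k rest ans n s = bLoop m k rest ans n t d := by
  induction rest with
  | nil => intro ans n s t d _ _ _; rfl
  | cons player rest ih =>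
    intro ans n s t d hm hn hinv
    have htick : (if n > 0 then tickLoop s.length s n else (s, n)) = (decF s, n - (s.count 1 : Int)) := by
      by_cases hpos : n > 0
      · rw [if_pos hpos]
        have := tick_spec s [] n
        simpa using this
      · rw [if_neg hpos]
        have hs : s = [] := by
          cases s with
          | nil => rfl
          | cons y ys => exfalso; simp at hn; omega
        subst hs
        simp only [hn] at *
        simp [decF]
    have hd_t : d.getD t 0 = (s.count 1 : Int) := by
      have := hinv t (le_refl t)
      simpa using this
    have hn1 : n - (s.count 1 : Int) = ((decF s).length : Int) := by
      rw [length_decF, hn]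
    show aLoop m k (player :: rest) ans n s = bLoop m k (player :: rest) ans n t d
    rw [aLoop, bLoop]
    simp only [htick, hd_t]
    by_cases hcond : player ≥ (n - (s.count 1 : Int) + 1) * m
    · rw [if_pos hcond, if_pos hcond]
      have hmpos : (0 : Int) < m := by omega
      have hge : n - (s.count 1 : Int) + 1 ≤ PySem.Int.floordiv player m := by
        rw [PySem.Int.le_floordiv_iff_mul_le hmpos]
        exact hcond
      have hadded : 1 ≤ PySem.Int.floordiv player m - (n - (s.count 1 : Int)) := by omega
      apply ih
      · exact hm
      · simp only [List.length_append, List.length_replicate]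
        push_cast [Int.toNat_of_nonneg (by omega : (0:Int) ≤ PySem.Int.floordiv player m - (n - (s.count 1 : Int)))]
        omega
      · intro h hh
        rw [PySem.Dict.getD_insert]
        by_cases hk : h = t + k
        · rw [if_pos hk]
          have hk1 : 1 ≤ k := by omega
          have hdk : d.getD (t + k) 0 = (s.count (k + 1) : Int) := by
            have := hinv (t + k) (by omega)
            have harg : t + k - t + 1 = k + 1 := by ring
            rw [harg] at this
            exact this
          have hc1 : h - (t + 1) + 1 = k := by omega
          rw [hdk, hc1]
          have hkne : (k : Int) ≠ 0 := by omega
          rw [List.count_append, count_decF_ne s k hkne, List.count_replicate]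
          simp only [BEq.rfl, if_true]
          push_cast [Int.toNat_of_nonneg (by omega : (0:Int) ≤ PySem.Int.floordiv player m - (n - (s.count 1 : Int)))]
          omega
        · rw [if_neg hk]
          have hc : h - (t + 1) + 1 = h - t := by ring
          rw [hc]
          have hne : h - t ≠ 0 := by omega
          rw [List.count_append, count_decF_ne s (h - t) hne, List.count_replicate]
          have hkne : ((k : Int) == h - t) = false := by
            simp only [beq_eq_false_iff_ne, ne_eq]
            omega
          rw [hkne]
          have := hinv h (by omega)
          rw [this]
          simp
    · rw [if_neg hcond, if_neg hcond]
      apply ih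
      · exact hm
      · exact hn1
      · intro h hh
        have hc : h - (t + 1) + 1 = h - t := by ring
        rw [hc]
        have hne : h - t ≠ 0 := by omega
        rw [count_decF_ne s (h - t) hne]
        exact hinv h (by omega)

-- ===== VERDICT (by name: the statement is the Claim_ definition above) =====
theorem solution_spec : Claim_equal_solution := by
  intro players m k _ hpre
  unfold Spec_solution solution solution_alt
  apply main_loop players m k 0 0 [] 0 PySem.Dict.empty hpre
  · rfl
  · intro h _
    simp [PySem.Dict.getD_empty]
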